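-- pv_equiv track=rewrite | github.com/antoine-gajan/UTC-INF2 | TP2/Exercice 3 - Sécurité mot de passe.py | LongMaj
-- ===== SOURCE A (Python) =====
-- def LongMaj(password:str) -> int:
--
--     # On initialise la plus longue séquence max à 0
--     maxNumber = 0
--     # On initialise la séquence de traitement à 0
--     currentNumber = 0
--
--     # On étudie chaque caractère du mdp
--     for char in password:
--
--         if char.isupper():
--             # Si le caractère est en majuscule on ajoute 1 la la séquence en cours
--             currentNumber = currentNumber+1
--         else:
--
--             # Si le caractère n'est pas en majuscule (nombre, caractère spécial ou min) la séquence est finie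
--             if currentNumber > maxNumber:
--                 # Si la séquence est plus longue que la séquence maximale on change la longueur de la séquence la plus
--                 maxNumber = currentNumber
--             # On remet à 0 la séquence en cours de traitement
--             currentNumber = 0
--
--     # À la fin de l'execution, on force la fin de la dernière séquence, et on retraite comme ci-dessus
--     if currentNumber > maxNumber:
--         maxNumber = currentNumber
--
--     return maxNumber
-- ===== SOURCE B (Python) =====
-- def LongMaj(password: str) -> int:
--     # Two-pointer scan: jump over each maximal uppercase run instead of
--     # maintaining a running counter flushed at run ends.
--     best = 0
--     i = 0
--     n = len(password)
--     while i < n: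
--         if password[i].isupper():
--             j = i + 1
--             while j < n and password[j].isupper():
--                 j += 1
--             if j - i > best:
--                 best = j - i
--             i = j
--         else:
--             i += 1
--     return best
-- ===== Notes on version B (the rewrite author's own statement) =====
-- stated objective: alternative
-- what changed: Replaces A's single-pass current/max accumulator (with an end-of-string flush) by a two-pointer scan that, at each uppercase position, measures the whole maximal uppercase run with an inner scan and jumps past it.
import Mathlib
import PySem

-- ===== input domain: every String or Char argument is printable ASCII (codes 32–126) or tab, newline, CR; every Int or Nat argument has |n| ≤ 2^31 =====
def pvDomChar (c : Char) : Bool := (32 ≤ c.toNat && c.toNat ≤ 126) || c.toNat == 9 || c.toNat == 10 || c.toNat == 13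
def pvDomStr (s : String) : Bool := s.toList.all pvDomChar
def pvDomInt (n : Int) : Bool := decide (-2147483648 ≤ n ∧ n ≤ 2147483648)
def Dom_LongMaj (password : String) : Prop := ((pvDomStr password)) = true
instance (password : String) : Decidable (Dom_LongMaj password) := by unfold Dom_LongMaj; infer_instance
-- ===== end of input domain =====

-- B is an alternative two-pointer scan (same O(n) cost): it jumps over each
-- maximal uppercase run, instead of A's running counter flushed at run ends.

-- ===== PORT A =====
-- A: one fold over the characters carrying (maxNumber, currentNumber), with a
-- final flush of the last run.
def LongMaj (password : String) : Int :=
  let st := password.toList.foldl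
    (fun (st : Int × Int) ch =>
      if PySem.Chars.isupper ch then (st.1, st.2 + 1)
      else (if st.2 > st.1 then st.2 else st.1, 0))
    (0, 0)
  if st.2 > st.1 then st.2 else st.1

-- ===== PORT B =====
-- inner while loop of Source B: length of the leading uppercase run
def pvRunLen : List Char → Nat
  | [] => 0
  | c :: r => if PySem.Chars.isupper c then pvRunLen r + 1 else 0

theorem pvRunLen_pos (c : Char) (r : List Char) (h : PySem.Chars.isupper c = true) :
    1 ≤ pvRunLen (c :: r) := by simp [pvRunLen, h]

-- outer while loop of Source B: recursion on the remaining suffix (i := j becomes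
-- dropping the measured run)
def pvGoB (best : Int) : List Char → Int
  | [] => best
  | c :: r =>
    if h : PySem.Chars.isupper c = true then
      pvGoB (if (pvRunLen (c :: r) : Int) > best then (pvRunLen (c :: r) : Int) else best)
        ((c :: r).drop (pvRunLen (c :: r)))
    else pvGoB best r
termination_by l => l.length
decreasing_by
  · have := pvRunLen_pos c r h
    simpa [List.length_drop] using by omega
  · simp

def LongMaj_alt (password : String) : Int := pvGoB 0 password.toList

-- ===== PRECONDITION & SPEC =====
def Spec_LongMaj (password : String) (out : Int) : Prop := out = LongMaj_alt password
instance (password : String) (out : Int) : Decidable (Spec_LongMaj password out) := by unfold Spec_LongMaj; infer_instance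

-- ===== CLAIM (what is proved, stated in full; the proofs are below) =====
def Claim_equal_LongMaj : Prop := ∀ (password : String), Dom_LongMaj password → Spec_LongMaj password (LongMaj password)

-- ===== LEMMAS AND PROOFS =====

-- A's loop as a structural recursion on the character list
def pvFA (m c : Int) : List Char → Int
  | [] => if c > m then c else m
  | x :: r =>
    if PySem.Chars.isupper x then pvFA m (c + 1) r
    else pvFA (if c > m then c else m) 0 r

theorem pvFA_eq_fold (l : List Char) (m c : Int) :
    (let st := l.foldl
        (fun (st : Int × Int) ch =>
          if PySem.Chars.isupper ch then (st.1, st.2 + 1)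
          else (if st.2 > st.1 then st.2 else st.1, 0))
        (m, c)
      if st.2 > st.1 then st.2 else st.1) = pvFA m c l := by
  induction l generalizing m c with
  | nil => simp [pvFA]
  | cons x r ih =>
    by_cases h : PySem.Chars.isupper x = true <;>
      simp [pvFA, h, List.foldl_cons, ← ih]

theorem pvRunLen_drop (l : List Char) :
    l.drop (pvRunLen l) = l.dropWhile PySem.Chars.isupper := by
  induction l with
  | nil => rfl
  | cons c r ih =>
    by_cases h : PySem.Chars.isupper c = true <;>
      simp [pvRunLen, List.dropWhile, h, ih]

-- consuming one maximal uppercase run in A's recursion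
theorem pvFA_run (l : List Char) (m c : Int) (hm : 0 ≤ m) (hc : 0 ≤ c) :
    pvFA m c l
      = pvFA (if c + (pvRunLen l : Int) > m then c + (pvRunLen l : Int) else m) 0
          (l.dropWhile PySem.Chars.isupper) := by
  induction l generalizing m c with
  | nil => simp [pvFA, pvRunLen]; split_ifs <;> omega
  | cons x r ih =>
    by_cases h : PySem.Chars.isupper x = true
    · have := ih m (c + 1) hm (by omega)
      simp [pvFA, h, pvRunLen, List.dropWhile, this]
      ring_nf
    · simp [pvFA, h, pvRunLen, List.dropWhile]
      split_ifs <;> simp_all <;> omega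

theorem pvGoB_eq_pvFA (l : List Char) (m : Int) (hm : 0 ≤ m) :
    pvGoB m l = pvFA m 0 l := by
  match l with
  | [] => simp [pvGoB, pvFA]; omega
  | c :: r =>
    by_cases h : PySem.Chars.isupper c = true
    · rw [pvGoB, dif_pos h, pvRunLen_drop]
      have hlt : ((c :: r).dropWhile PySem.Chars.isupper).length < (c :: r).length := by
        have h1 := pvRunLen_pos c r h
        have := pvRunLen_drop (c :: r)
        have h2 : ((c :: r).drop (pvRunLen (c :: r))).length
            = (c :: r).length - pvRunLen (c :: r) := List.length_drop
        rw [this] at h2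
        simp at h2 ⊢
        omega
      rw [pvGoB_eq_pvFA _ _ (by split_ifs <;> omega)]
      rw [pvFA_run (c :: r) m 0 hm le_rfl]
      simp
    · rw [pvGoB, dif_neg h, pvGoB_eq_pvFA r m hm]
      have hstep : pvFA m 0 (c :: r) = pvFA (if (0 : Int) > m then 0 else m) 0 r := by
        simp [pvFA, h]
      rw [hstep, if_neg (by omega)]
termination_by l.length
decreasing_by
  · exact hlt
  · simp

-- ===== VERDICT (by name: the statement is the Claim_ definition above) =====
theorem LongMaj_spec : Claim_equal_LongMaj := by
  intro password _
  unfold Spec_LongMaj LongMaj LongMaj_alt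
  rw [pvGoB_eq_pvFA _ 0 le_rfl, ← pvFA_eq_fold]
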